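-- pv_equiv track=rewrite | github.com/pypi-data/pypi-mirror-392 | packages/stor4build/stor4build-0.3.0.tar.gz/stor4build-0.3.0/src/stor4build/util.py | rate_array
-- ===== SOURCE A (Python) =====
-- def rate_array(sch, rates):
--     result = []
--     for v in sch:
--         if v in rates:
--             result.append(rates[v])
--         else:
--             return None
--     return result
-- ===== SOURCE B (Python) =====
-- def rate_array(sch, rates):
--     if all(v in rates for v in sch):
--         return [rates[v] for v in sch]
--     return None
-- ===== Notes on version B (the rewrite author's own statement) =====
-- stated objective: simpler
-- what changed: Replaces A's single interleaved loop with early return and an appended accumulator by two passes: one all() membership scan validating every key, then a comprehension building the result.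
import Mathlib
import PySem

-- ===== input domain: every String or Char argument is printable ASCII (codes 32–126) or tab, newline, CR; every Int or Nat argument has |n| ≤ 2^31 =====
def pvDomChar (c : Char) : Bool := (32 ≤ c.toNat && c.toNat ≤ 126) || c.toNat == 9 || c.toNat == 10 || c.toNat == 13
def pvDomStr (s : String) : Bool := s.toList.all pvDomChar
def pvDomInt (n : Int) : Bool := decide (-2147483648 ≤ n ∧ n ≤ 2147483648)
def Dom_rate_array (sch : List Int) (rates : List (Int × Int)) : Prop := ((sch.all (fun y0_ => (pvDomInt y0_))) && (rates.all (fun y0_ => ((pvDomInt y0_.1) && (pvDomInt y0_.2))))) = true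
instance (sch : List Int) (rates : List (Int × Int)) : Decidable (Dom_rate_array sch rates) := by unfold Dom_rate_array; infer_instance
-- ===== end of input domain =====

-- B replaces A's single early-return loop by two passes (validate all keys, then build); objective: simpler.
-- ===== PORT A =====
-- loop of A: walk sch, append rates[v] to result, return None on a missing key
def rateArrayGo (rates : List (Int × Int)) : List Int → List Int → Option (List Int)
  | [], result => some result
  | v :: rest, result =>
    if (PySem.Dict.mk rates).contains v then
      rateArrayGo rates rest (result ++ [(PySem.Dict.mk rates).getD v 0])
    else none

def rate_array (sch : List Int) (rates : List (Int × Int)) : Option (List Int) :=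
  rateArrayGo rates sch []

-- ===== PORT B =====
def rate_array_alt (sch : List Int) (rates : List (Int × Int)) : Option (List Int) :=
  if sch.all (fun v => (PySem.Dict.mk rates).contains v) then
    some (sch.map (fun v => (PySem.Dict.mk rates).getD v 0))
  else none

-- ===== PRECONDITION & SPEC =====
def Spec_rate_array (sch : List Int) (rates : List (Int × Int)) (out : Option (List Int)) : Prop := out = rate_array_alt sch rates
instance (sch : List Int) (rates : List (Int × Int)) (out : Option (List Int)) : Decidable (Spec_rate_array sch rates out) := by unfold Spec_rate_array; infer_instance

-- ===== CLAIM (what is proved, stated in full; the proofs are below) =====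
def Claim_equal_rate_array : Prop := ∀ (sch : List Int) (rates : List (Int × Int)), Dom_rate_array sch rates → Spec_rate_array sch rates (rate_array sch rates)

-- ===== LEMMAS AND PROOFS =====

-- ===== VERDICT (by name: the statement is the Claim_ definition above) =====
lemma rateArrayGo_eq (rates : List (Int × Int)) :
    ∀ (sch acc : List Int), rateArrayGo rates sch acc =
      if sch.all (fun v => (PySem.Dict.mk rates).contains v) then
        some (acc ++ sch.map (fun v => (PySem.Dict.mk rates).getD v 0))
      else none := by
  intro sch
  induction sch with
  | nil => intro acc; simp [rateArrayGo]
  | cons v rest ih =>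
    intro acc
    by_cases h : (PySem.Dict.mk rates).contains v = true
    · rw [rateArrayGo, if_pos h, ih]
      simp only [List.all_cons, h, Bool.true_and, List.map_cons]
      split
      · simp
      · rfl
    · rw [rateArrayGo, if_neg h, if_neg]
      simp only [List.all_cons, Bool.and_eq_true, not_and]
      intro hc
      exact absurd hc h

theorem rate_array_spec : Claim_equal_rate_array := by
  intro sch rates _
  unfold Spec_rate_array rate_array rate_array_alt
  rw [rateArrayGo_eq]
  simp
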